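-- pv_equiv track=rewrite | github.com/JuanDCH02/pp_lab1_Clemente_Juan | main.py | keys_stats
-- ===== SOURCE A (Python) =====
-- def normalize_string(txt:str):
--     '''
--     normalizo un str quitando los '_' y capitalizandolo
--     :param txt: string a normalizar
--     :return: string normalizado
--     '''
--     txt = txt.replace("_", " ").capitalize()
--     return txt
--
-- def keys_stats(lista_jugadores:list):
--     '''
--     creo una lista con las keys del diccionario 'estadisticas'
--     :param lista_jugadores: lista de jugadores
--     :return: lista con las keys
--     '''
--     flag = False
--     list_keys = []
--     for player in lista_jugadores:
--         if flag == False: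
--             for key in player["estadisticas"].keys():
--                 list_keys.append(normalize_string(key))
--                 flag = True
--     return list_keys
-- ===== SOURCE B (Python) =====
-- def normalize_string(txt: str):
--     return txt.replace("_", " ").capitalize()
--
-- def keys_stats(lista_jugadores: list):
--     if not lista_jugadores:
--         return []
--     keys = [normalize_string(k) for k in lista_jugadores[0]["estadisticas"]]
--     return keys if keys else keys_stats(lista_jugadores[1:])
-- ===== Notes on version B (the rewrite author's own statement) =====
-- stated objective: simpler
-- what changed: A's iterative loop over all players with a sticky flag is replaced by structural recursion: normalize the head player's keys, return them if non-empty, else recurse on the tail (transform-then-test instead of test-then-transform, and no traversal past the answer).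
import Mathlib
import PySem

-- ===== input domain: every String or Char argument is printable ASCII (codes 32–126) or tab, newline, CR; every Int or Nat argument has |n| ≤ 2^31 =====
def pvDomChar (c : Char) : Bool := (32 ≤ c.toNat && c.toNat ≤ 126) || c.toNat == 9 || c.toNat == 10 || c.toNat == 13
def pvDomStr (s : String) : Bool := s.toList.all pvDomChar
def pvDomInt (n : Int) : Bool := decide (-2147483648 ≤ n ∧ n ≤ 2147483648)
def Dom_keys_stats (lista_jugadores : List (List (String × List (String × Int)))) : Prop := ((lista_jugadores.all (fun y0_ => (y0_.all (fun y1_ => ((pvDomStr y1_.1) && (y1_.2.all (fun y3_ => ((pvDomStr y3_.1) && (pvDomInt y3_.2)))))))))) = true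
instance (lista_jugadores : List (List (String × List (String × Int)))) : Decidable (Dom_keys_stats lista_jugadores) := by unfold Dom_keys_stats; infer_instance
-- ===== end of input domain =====

-- B replaces A's iterative flag loop by structural recursion (normalize head keys, test, else recurse); simpler, return value only.


-- ===== PORT A =====
-- Python str.capitalize(): first char uppercased, rest lowered — hand port, exact on ASCII (PySem has no capitalize)
def pyCapitalize : List Char → List Char
  | [] => []
  | c :: rest => PySem.Chars.upperChar c :: PySem.Chars.lower rest

def normalize_string (txt : String) : String :=
  String.ofList (pyCapitalize (PySem.Chars.replace txt.toList ['_'] [' ']))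

-- the 'estadisticas' dict of a player (lookup on the player dict; empty default only reached outside Pre_)
def pvStats (player : List (String × List (String × Int))) : PySem.Dict String Int :=
  PySem.Dict.ofList ((PySem.Dict.ofList player).getD "estadisticas" [])

-- A: for player in lista: if flag == False: for key in player["estadisticas"].keys(): append; flag = True
def keys_stats (lista_jugadores : List (List (String × List (String × Int)))) : List String :=
  (lista_jugadores.foldl
    (fun (st : Bool × List String) player =>
      if st.1 = false then
        ((pvStats player).keys).foldl
          (fun (st2 : Bool × List String) key => (true, st2.2 ++ [normalize_string key])) st
      else st)
    (false, [])).2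

-- ===== PORT B =====
-- B: if not lista: return []; keys = [normalize_string(k) for k in lista[0]["estadisticas"]];
--    return keys if keys else keys_stats(lista[1:])
def keys_stats_alt : List (List (String × List (String × Int))) → List String
  | [] => []
  | p :: rest =>
    let keys := ((pvStats p).keys).map normalize_string
    if keys ≠ [] then keys else keys_stats_alt rest

-- ===== PRECONDITION & SPEC =====
-- Pre_ excludes exactly the KeyError inputs: A looks up player["estadisticas"] in each player until
-- the first one whose stats dict is non-empty, and raises KeyError when such a player lacks the key.
def Pre_keys_stats (lista_jugadores : List (List (String × List (String × Int)))) : Prop :=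
  ∀ i, (hi : i < lista_jugadores.length) →
    (∀ j, (hj : j < i) →
      (PySem.Dict.ofList (lista_jugadores[j]'(hj.trans hi))).getD "estadisticas" [] = []) →
    (PySem.Dict.ofList lista_jugadores[i]).contains "estadisticas" = true
instance (lista_jugadores : List (List (String × List (String × Int)))) : Decidable (Pre_keys_stats lista_jugadores) := by unfold Pre_keys_stats; infer_instance

def pvWitness_keys_stats : (List (List (String × List (String × Int)))) :=
  [[("estadisticas", [])], [("estadisticas", [("a_b", 1), ("c", 2)])], []]

def Spec_keys_stats (lista_jugadores : List (List (String × List (String × Int)))) (out : List String) : Prop := out = keys_stats_alt lista_jugadores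
instance (lista_jugadores : List (List (String × List (String × Int)))) (out : List String) : Decidable (Spec_keys_stats lista_jugadores out) := by unfold Spec_keys_stats; infer_instance

-- ===== CLAIM (what is proved, stated in full; the proofs are below) =====
def Claim_equal_keys_stats : Prop := ∀ (lista_jugadores : List (List (String × List (String × Int)))), Dom_keys_stats lista_jugadores → Pre_keys_stats lista_jugadores → Spec_keys_stats lista_jugadores (keys_stats lista_jugadores)

-- ===== LEMMAS AND PROOFS =====

-- A's outer step function, with the inner 'for key' loop summarised as flag-update + append
def pvStepA (st : Bool × List String) (player : List (String × List (String × Int))) : Bool × List String :=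
  if st.1 = false then
    ((if (pvStats player).keys = [] then st.1 else true),
      st.2 ++ (pvStats player).keys.map normalize_string)
  else st

-- the inner 'for key in …' loop: sets the flag iff a key exists, appends the normalized keys
lemma inner_fold (ks : List String) (st : Bool × List String) :
    ks.foldl (fun (st2 : Bool × List String) key => (true, st2.2 ++ [normalize_string key])) st
      = (if ks = [] then st.1 else true, st.2 ++ ks.map normalize_string) := by
  induction ks generalizing st with
  | nil => simp
  | cons k t ih => simp [List.foldl_cons, ih]

lemma step_eq :
    (fun (st : Bool × List String) player =>
      if st.1 = false then
        ((pvStats player).keys).foldl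
          (fun (st2 : Bool × List String) key => (true, st2.2 ++ [normalize_string key])) st
      else st) = pvStepA := by
  funext st player
  by_cases hf : st.1 = false
  · simp [pvStepA, hf, inner_fold]
  · simp [pvStepA, hf]

-- once the flag is true, the outer loop is inert
lemma outer_true (xs : List (List (String × List (String × Int)))) (acc : List String) :
    xs.foldl pvStepA (true, acc) = (true, acc) := by
  induction xs with
  | nil => rfl
  | cons p t ih => simpa [pvStepA] using ih

lemma main_fold (xs : List (List (String × List (String × Int)))) (acc : List String) :
    (xs.foldl pvStepA (false, acc)).2 = acc ++ keys_stats_alt xs := by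
  induction xs generalizing acc with
  | nil => simp [keys_stats_alt]
  | cons p t ih =>
    rw [List.foldl_cons, keys_stats_alt]
    by_cases h : (pvStats p).keys = []
    · simp only [pvStepA, h, List.map_nil]
      simpa [h] using ih acc
    · have hm : ((pvStats p).keys).map normalize_string ≠ [] := by
        simpa using h
      simp [pvStepA, h, hm, outer_true]

-- ===== VERDICT (by name: the statement is the Claim_ definition above) =====
theorem keys_stats_spec : Claim_equal_keys_stats := by
  intro xs _ _
  unfold Spec_keys_stats keys_stats
  rw [step_eq]
  simpa using main_fold xs []
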